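-- pv_equiv track=rewrite | github.com/davidanderson3/rxnorm-text-recognition | rxnorm_text_recognition.py | collapse_spelled_letters
-- ===== SOURCE A (Python) =====
-- from typing import Dict, Iterable, List, Optional, Sequence, Set, Tuple
--
-- def collapse_spelled_letters(text: str) -> str:
--     tokens = text.split()
--     if not tokens:
--         return text
--     merged: List[str] = []
--     i = 0
--     while i < len(tokens):
--         if len(tokens[i]) == 1 and tokens[i].isalpha():
--             j = i
--             while j < len(tokens) and len(tokens[j]) == 1 and tokens[j].isalpha():
--                 j += 1
--             if j - i >= 3:
--                 merged.append("".join(tokens[i:j]))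
--             else:
--                 merged.extend(tokens[i:j])
--             i = j
--             continue
--         merged.append(tokens[i])
--         i += 1
--     return " ".join(merged)
-- ===== SOURCE B (Python) =====
-- def collapse_spelled_letters(text: str) -> str:
--     tokens = text.split()
--     if not tokens:
--         return text
--     is_l = [len(t) == 1 and t.isalpha() for t in tokens]
--     n = len(tokens)
--     parts = [tokens[0]]
--     for k in range(1, n):
--         glue = (is_l[k - 1] and is_l[k]
--                 and ((k >= 2 and is_l[k - 2]) or (k + 1 < n and is_l[k + 1])))
--         parts.append(('' if glue else ' ') + tokens[k])
--     return ''.join(parts)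
-- ===== Notes on version B (the rewrite author's own statement) =====
-- stated objective: alternative
-- what changed: Replaces A's run detection (nested i/j pointer scan with slicing and per-run join/extend) by a purely local stencil: B precomputes a single-letter mask and chooses the separator before each token from a 4-token window, gluing two adjacent letter tokens exactly when a third letter token is adjacent on either side, which coincides with A's minimum-run-of-three criterion without ever finding runs.
import Mathlib
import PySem

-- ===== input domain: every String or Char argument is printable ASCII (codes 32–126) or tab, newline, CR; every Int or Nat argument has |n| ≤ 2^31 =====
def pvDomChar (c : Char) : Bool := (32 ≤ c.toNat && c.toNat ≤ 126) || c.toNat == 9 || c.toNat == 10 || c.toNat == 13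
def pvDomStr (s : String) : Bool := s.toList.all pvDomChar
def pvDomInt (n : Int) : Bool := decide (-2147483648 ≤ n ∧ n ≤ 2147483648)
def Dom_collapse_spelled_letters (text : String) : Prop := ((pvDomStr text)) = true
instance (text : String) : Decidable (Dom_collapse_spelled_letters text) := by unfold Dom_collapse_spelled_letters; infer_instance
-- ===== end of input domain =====

-- B replaces A's run-finding scan by a local 4-token window rule that picks the separator
-- before each token (objective: alternative; same asymptotic cost).

-- `len(t) == 1 and t.isalpha()` — the single-letter test both programs use
def pvIsL (t : String) : Bool := (PySem.Str.len t == 1) && PySem.Str.strIsalpha t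

-- ===== PORT A =====
-- inner `while j < len(tokens) and len(tokens[j]) == 1 and tokens[j].isalpha(): j += 1`
def pvJScan (tokens : List String) (j : Nat) : Nat :=
  if h : j < tokens.length then
    if pvIsL tokens[j] then pvJScan tokens (j + 1) else j
  else j
termination_by tokens.length - j

-- termination fact for the outer loop: the scan strictly advances
theorem pvJScan_ge (tokens : List String) (j : Nat) : j ≤ pvJScan tokens j := by
  unfold pvJScan
  split
  · split
    · exact le_trans (Nat.le_succ j) (pvJScan_ge tokens (j + 1))
    · exact le_refl j
  · exact le_refl j
termination_by tokens.length - j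

-- outer `while i < len(tokens): …` building `merged`
def pvALoop (tokens : List String) (i : Nat) (merged : List String) : List String :=
  if h : i < tokens.length then
    if hl : pvIsL tokens[i] then
      let j := pvJScan tokens i
      let seg := (tokens.drop i).take (j - i)
      pvALoop tokens j
        (if 3 ≤ j - i then merged ++ [PySem.Str.join "" seg] else merged ++ seg)
    else
      pvALoop tokens (i + 1) (merged ++ [tokens[i]])
  else merged
termination_by tokens.length - i
decreasing_by
  · have h1 : i + 1 ≤ pvJScan tokens (i + 1) := pvJScan_ge tokens (i + 1)
    have : pvJScan tokens i = pvJScan tokens (i + 1) := by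
      conv_lhs => unfold pvJScan
      simp [h, hl]
    omega
  · omega

def collapse_spelled_letters (text : String) : String :=
  let tokens := PySem.Str.split₀ text
  if tokens = [] then text
  else PySem.Str.join " " (pvALoop tokens 0 [])

-- ===== PORT B =====
-- `is_l[k-1] and is_l[k] and ((k >= 2 and is_l[k-2]) or (k+1 < n and is_l[k+1]))`
-- (every unguarded index is in range when 1 ≤ k < n, so List.getD is exact there)
def pvGlue (isl : List Bool) (n : Nat) (k : Nat) : Bool :=
  isl.getD (k - 1) false && isl.getD k false &&
    ((decide (2 ≤ k) && isl.getD (k - 2) false) ||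
     (decide (k + 1 < n) && isl.getD (k + 1) false))

-- `('' if glue else ' ') + tokens[k]` — string concatenation written as ''.join of the two parts (exact)
def pvPiece (tokens : List String) (isl : List Bool) (n : Nat) (k : Nat) : String :=
  PySem.Str.join "" [if pvGlue isl n k then "" else " ", tokens.getD k ""]

def collapse_spelled_letters_alt (text : String) : String :=
  let tokens := PySem.Str.split₀ text
  if tokens = [] then text
  else
    let isl := tokens.map pvIsL
    let n := tokens.length
    -- `for k in range(1, n): parts.append(…)` ; every k drawn from the range is ≥ 1, so .toNat is exact
    PySem.Str.join ""
      ((PySem.List.pyRange 1 (n : Int)).foldl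
        (fun parts k => parts ++ [pvPiece tokens isl n k.toNat])
        [tokens.getD 0 ""])

-- ===== PRECONDITION & SPEC =====
def Spec_collapse_spelled_letters (text : String) (out : String) : Prop := out = collapse_spelled_letters_alt text
instance (text : String) (out : String) : Decidable (Spec_collapse_spelled_letters text out) := by unfold Spec_collapse_spelled_letters; infer_instance

-- ===== CLAIM (what is proved, stated in full; the proofs are below) =====
def Claim_equal_collapse_spelled_letters : Prop := ∀ (text : String), Dom_collapse_spelled_letters text → Spec_collapse_spelled_letters text (collapse_spelled_letters text)

-- ===== LEMMAS AND PROOFS =====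

-- reference form of A's result: collapse one maximal run at a time
def pvG : List String → List String
  | [] => []
  | t :: ts =>
    if pvIsL t then
      let run := t :: ts.takeWhile pvIsL
      (if 3 ≤ run.length then [PySem.Str.join "" run] else run) ++ pvG (ts.dropWhile pvIsL)
    else t :: pvG ts
termination_by l => l.length
decreasing_by
  · have := List.length_dropWhile_le pvIsL ts
    simp; omega
  · simp

-- reference form of the OUTPUT CHARACTERS shared by both proofs: walk the token list emitting
-- each token preceded (from the second on) by the separator the local window rule chooses;
-- `prev` says whether the token before the current head was a single letter
def pvSt (prev : Bool) : List String → List Char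
  | [] => []
  | [x] => x.toList
  | x :: y :: t =>
      x.toList ++
      (if pvIsL x && pvIsL y &&
          (prev || (match t with | [] => false | z :: _ => pvIsL z)) then [] else [' ']) ++
      pvSt (pvIsL x) (y :: t)

theorem pv_join_nil_flatten (ps : List (List Char)) :
    PySem.Chars.join [] ps = ps.flatten := by
  match ps with
  | [] => simp [PySem.Chars.join_nil]
  | [p] => simp [PySem.Chars.join_singleton]
  | p :: q :: rest =>
      rw [PySem.Chars.join_cons_cons, pv_join_nil_flatten (q :: rest)]
      simp

theorem pvSt_prev_indep (p q : Bool) (x : String) (ts : List String)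
    (hx : pvIsL x = false) : pvSt p (x :: ts) = pvSt q (x :: ts) := by
  cases ts with
  | nil => rfl
  | cons y t => simp [pvSt, hx]

theorem pvJScan_eq (tokens : List String) (i : Nat) :
    pvJScan tokens i = i + ((tokens.drop i).takeWhile pvIsL).length := by
  unfold pvJScan
  split
  · rename_i h
    rw [List.drop_eq_getElem_cons h]
    split
    · rename_i hl
      rw [pvJScan_eq tokens (i + 1), List.takeWhile_cons_of_pos hl]
      simp; omega
    · rename_i hl
      rw [List.takeWhile_cons_of_neg hl]
      simp
  · rename_i h
    rw [List.drop_eq_nil_of_le (by omega)]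
    simp
termination_by tokens.length - i

theorem pv_dropWhile_eq_drop {α : Type} (p : α → Bool) (l : List α) :
    l.dropWhile p = l.drop (l.takeWhile p).length := by
  induction l with
  | nil => simp
  | cons a l ih =>
    by_cases h : p a <;> simp [h, ih]

theorem pv_takeWhile_eq_take {α : Type} (p : α → Bool) (l : List α) :
    l.takeWhile p = l.take (l.takeWhile p).length := by
  induction l with
  | nil => simp
  | cons a l ih =>
    by_cases h : p a <;> simp [h]
    exact ih

theorem pvALoop_eq (n : Nat) (tokens : List String) (i : Nat) (merged : List String)
    (hn : tokens.length - i ≤ n) :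
    pvALoop tokens i merged = merged ++ pvG (tokens.drop i) := by
  induction n generalizing i merged with
  | zero =>
    have hge : tokens.length ≤ i := by omega
    unfold pvALoop
    rw [dif_neg (by omega), List.drop_eq_nil_of_le hge]
    simp [pvG]
  | succ m ih =>
    unfold pvALoop
    split
    · rename_i h
      split
      · rename_i hl
        have hj : pvJScan tokens i = i + ((tokens.drop i).takeWhile pvIsL).length :=
          pvJScan_eq tokens i
        set tw := (tokens.drop i).takeWhile pvIsL with htw
        have htw1 : 1 ≤ tw.length := by
          rw [htw, List.drop_eq_getElem_cons h, List.takeWhile_cons_of_pos hl]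
          simp
        have hseg : (tokens.drop i).take (pvJScan tokens i - i) = tw := by
          rw [hj]; simp only [Nat.add_sub_cancel_left]
          exact (pv_takeWhile_eq_take pvIsL (tokens.drop i)).symm
        have hdropj : tokens.drop (pvJScan tokens i) = (tokens.drop i).dropWhile pvIsL := by
          rw [hj, ← List.drop_drop, ← pv_dropWhile_eq_drop]
        rw [ih (pvJScan tokens i) _ (by omega)]
        rw [hseg, hdropj]
        conv_rhs => rw [List.drop_eq_getElem_cons h]
        conv_rhs => rw [show pvG (tokens[i] :: tokens.drop (i + 1)) =
          (if 3 ≤ (tokens[i] :: (tokens.drop (i+1)).takeWhile pvIsL).length then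
              [PySem.Str.join "" (tokens[i] :: (tokens.drop (i+1)).takeWhile pvIsL)]
            else tokens[i] :: (tokens.drop (i+1)).takeWhile pvIsL)
            ++ pvG ((tokens.drop (i+1)).dropWhile pvIsL) from by rw [pvG]; simp [hl]]
        have hrun : tw = tokens[i] :: (tokens.drop (i + 1)).takeWhile pvIsL := by
          rw [htw, List.drop_eq_getElem_cons h, List.takeWhile_cons_of_pos hl]
        have hdw : (tokens.drop i).dropWhile pvIsL = (tokens.drop (i + 1)).dropWhile pvIsL := by
          rw [List.drop_eq_getElem_cons h, List.dropWhile_cons_of_pos hl]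
        rw [← hrun, ← hdw, hj]
        simp only [Nat.add_sub_cancel_left]
        split <;> simp
      · rename_i hl
        rw [ih (i + 1) _ (by omega)]
        conv_rhs => rw [List.drop_eq_getElem_cons h]
        conv_rhs => rw [show pvG (tokens[i] :: tokens.drop (i + 1)) =
          tokens[i] :: pvG (tokens.drop (i + 1)) from by rw [pvG]; simp [hl]]
        simp
    · rename_i h
      rw [List.drop_eq_nil_of_le (by omega)]
      simp [pvG]

theorem pvG_ne_nil (tokens : List String) (h : tokens ≠ []) : pvG tokens ≠ [] := by
  cases tokens with
  | nil => exact absurd rfl h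
  | cons t ts =>
    rw [pvG]
    by_cases hl : pvIsL t = true <;> simp [hl]
    split <;> simp

-- head of a dropWhile fails the predicate (specific nameless fact used twice below)
theorem pv_head_dropWhile {α : Type} (p : α → Bool) (l : List α) (z : α)
    (h : (l.dropWhile p).head? = some z) : p z = false := by
  induction l with
  | nil => simp at h
  | cons a t ih =>
    by_cases ha : p a
    · rw [List.dropWhile_cons_of_pos ha] at h; exact ih h
    · rw [List.dropWhile_cons_of_neg ha] at h; simp at h; subst h; simpa using ha

theorem pv_islGetD (tokens : List String) (j : Nat) (h : j < tokens.length) :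
    (tokens.map pvIsL).getD j false = pvIsL (tokens.getD j "") := by
  simp [List.getD_eq_getElem?_getD, h]

-- inside a run (prev is a letter): every separator is glued; at the run's end a space follows
theorem pvSt_run (run rest : List String) (hne : run ≠ [])
    (hall : ∀ s ∈ run, pvIsL s = true)
    (hrest : ∀ z, rest.head? = some z → pvIsL z = false) :
    pvSt true (run ++ rest) =
      (run.map String.toList).flatten ++
        (if rest = [] then [] else ' ' :: pvSt false rest) := by
  match run with
  | [] => exact absurd rfl hne
  | [x] =>
    have hx : pvIsL x = true := hall x (by simp)
    cases rest with
    | nil => simp [pvSt]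
    | cons r rs =>
      have hr : pvIsL r = false := hrest r rfl
      have h2 : pvSt true (r :: rs) = pvSt false (r :: rs) :=
        pvSt_prev_indep _ _ _ _ hr
      simp [pvSt, hx, hr, h2]
  | x :: y :: run' =>
    have hx : pvIsL x = true := hall x (by simp)
    have hy : pvIsL y = true := hall y (by simp)
    have ih := pvSt_run (y :: run') rest (by simp)
      (fun s hs => hall s (by simp at hs ⊢; tauto)) hrest
    have hstep : pvSt true (x :: y :: (run' ++ rest)) =
        x.toList ++ pvSt true (y :: (run' ++ rest)) := by
      simp [pvSt, hx, hy]
    simp only [List.cons_append] at ih ⊢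
    rw [hstep, ih]
    simp

-- A's result, rendered: join " " over pvG IS the stencil walk
theorem pvG_join_eq_pvSt (n : Nat) (tokens : List String)
    (hn : tokens.length ≤ n) (hne : tokens ≠ []) :
    PySem.Chars.join [' '] ((pvG tokens).map String.toList) = pvSt false tokens := by
  induction n generalizing tokens with
  | zero =>
    cases tokens with
    | nil => exact absurd rfl hne
    | cons a b => simp at hn
  | succ m ih =>
    match tokens, hne with
    | [t], _ =>
      have hpg : pvG [t] = [t] := by
        rw [pvG]; by_cases hl : pvIsL t = true <;> simp [hl, pvG]
      rw [hpg]; simp [PySem.Chars.join_singleton, pvSt]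
    | t :: u :: us, _ =>
      have hcons : ∀ (v : List String), v ≠ [] → ∀ (x : String),
          PySem.Chars.join [' '] ((x :: v).map String.toList) =
            x.toList ++ [' '] ++ PySem.Chars.join [' '] (v.map String.toList) := by
        intro v hv x
        cases v with
        | nil => exact absurd rfl hv
        | cons q qs => simp [PySem.Chars.join_cons_cons]
      by_cases hlt : pvIsL t = true
      · by_cases hu : pvIsL u = true
        · cases us with
          | nil =>
            have hpg : pvG [t, u] = [t, u] := by
              rw [pvG]; simp [hlt, hu, pvG]
            rw [hpg]
            simp [PySem.Chars.join_cons_cons, PySem.Chars.join_singleton, pvSt, hlt, hu]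
          | cons z zs =>
            by_cases hz : pvIsL z = true
            · -- run of length ≥ 3
              set tw := (z :: zs).takeWhile pvIsL with htw
              set rest := (z :: zs).dropWhile pvIsL with hrest
              clear_value tw rest
              have htw' : tw = z :: zs.takeWhile pvIsL := by
                rw [htw, List.takeWhile_cons_of_pos hz]
              have hsplit : z :: zs = tw ++ rest := by
                rw [htw, hrest, List.takeWhile_append_dropWhile]
              have hpg : pvG (t :: u :: z :: zs) =
                  [PySem.Str.join "" (t :: u :: tw)] ++ pvG rest := by
                rw [pvG]
                have h1 : (u :: z :: zs).takeWhile pvIsL = u :: tw := by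
                  rw [List.takeWhile_cons_of_pos hu, htw]
                have h2 : (u :: z :: zs).dropWhile pvIsL = rest := by
                  rw [List.dropWhile_cons_of_pos hu, hrest]
                rw [h1, h2]
                simp [hlt, htw', List.length_cons]
              have hallrun : ∀ s ∈ u :: tw, pvIsL s = true := by
                intro s hs
                rcases List.mem_cons.mp hs with h | hs'
                · exact h ▸ hu
                · rw [htw] at hs'; exact List.mem_takeWhile_imp hs' 
              have hrhead : ∀ w, rest.head? = some w → pvIsL w = false := by
                intro w hw; exact pv_head_dropWhile pvIsL (z :: zs) w (hrest ▸ hw)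
              have hst : pvSt false (t :: u :: z :: zs) =
                  t.toList ++ pvSt true (u :: z :: zs) := by
                simp [pvSt, hlt, hu, hz]
              have hst2 : pvSt true (u :: z :: zs) =
                  ((u :: tw).map String.toList).flatten ++
                    (if rest = [] then [] else ' ' :: pvSt false rest) := by
                have := pvSt_run (u :: tw) rest (by simp) hallrun hrhead
                rw [← this]
                congr 1
                rw [hsplit]; simp
              have hjr : (PySem.Str.join "" (t :: u :: tw)).toList =
                  ((t :: u :: tw).map String.toList).flatten := by
                rw [PySem.Str.toList_join]
                simpa using pv_join_nil_flatten ((t :: u :: tw).map String.toList)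
              rw [hpg, hst]
              by_cases hre : rest = []
              · have hG : pvG rest = [] := by rw [hre, pvG]
                rw [hG, List.append_nil, List.map_singleton,
                  PySem.Chars.join_singleton, hjr, hst2, if_pos hre]
                simp
              · have hlen : rest.length ≤ m := by
                  have h1 : rest.length ≤ zs.length + 1 := by
                    rw [hrest]
                    simpa using List.length_dropWhile_le pvIsL (z :: zs)
                  simp at hn; omega
                rw [List.singleton_append, hcons (pvG rest) (pvG_ne_nil rest hre) _,
                  ih rest hlen hre, hjr, hst2, if_neg hre]
                simp
            · -- run of exactly 2: t u, then a non-letter z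
              have hpg : pvG (t :: u :: z :: zs) = t :: u :: pvG (z :: zs) := by
                rw [pvG]
                rw [List.takeWhile_cons_of_pos hu, List.takeWhile_cons_of_neg (by simp [hz]),
                  List.dropWhile_cons_of_pos hu, List.dropWhile_cons_of_neg (by simp [hz])]
                simp [hlt]
              have hne2 : (z :: zs : List String) ≠ [] := by simp
              have hst : pvSt false (t :: u :: z :: zs) =
                  t.toList ++ [' '] ++ (u.toList ++ [' '] ++ pvSt false (z :: zs)) := by
                have h1 : pvSt true (z :: zs) = pvSt false (z :: zs) :=
                  pvSt_prev_indep _ _ _ _ (by simpa using hz)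
                simp [pvSt, hlt, hu, hz, h1]
              rw [hpg, hcons (u :: pvG (z :: zs)) (by simp) t,
                hcons (pvG (z :: zs)) (pvG_ne_nil _ hne2) u,
                ih (z :: zs) (by simp at hn ⊢; omega) hne2, hst]
        · -- run of exactly 1: t, then a non-letter u
          have hpg : pvG (t :: u :: us) = t :: pvG (u :: us) := by
            rw [pvG]
            rw [List.takeWhile_cons_of_neg (by simp [hu]),
              List.dropWhile_cons_of_neg (by simp [hu])]
            simp [hlt]
          have hne2 : (u :: us : List String) ≠ [] := by simp
          have hst : pvSt false (t :: u :: us) =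
              t.toList ++ [' '] ++ pvSt false (u :: us) := by
            have h1 : pvSt true (u :: us) = pvSt false (u :: us) :=
              pvSt_prev_indep _ _ _ _ (by simpa using hu)
            simp [pvSt, hlt, hu, h1]
          rw [hpg, hcons (pvG (u :: us)) (pvG_ne_nil _ hne2) t,
            ih (u :: us) (by simp at hn ⊢; omega) hne2, hst]
      · -- non-letter head
        have hpg : pvG (t :: u :: us) = t :: pvG (u :: us) := by
          rw [pvG]; simp [hlt]
        have hne2 : (u :: us : List String) ≠ [] := by simp
        rw [hpg, hcons (pvG (u :: us)) (pvG_ne_nil _ hne2) t,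
          ih (u :: us) (by simp at hn ⊢; omega) hne2]
        simp [pvSt, hlt]

theorem pvPiece_toList (tokens : List String) (isl : List Bool) (n k : Nat) :
    (pvPiece tokens isl n k).toList =
      (if pvGlue isl n k then [] else [' ']) ++ (tokens.getD k "").toList := by
  unfold pvPiece
  rw [PySem.Str.toList_join]
  by_cases h : pvGlue isl n k <;>
    simp [h, PySem.Chars.join_cons_cons, PySem.Chars.join_singleton]

theorem pv_drop_cons (tokens : List String) (i : Nat) (h : i < tokens.length) :
    tokens.drop i = tokens.getD i "" :: tokens.drop (i + 1) := by
  rw [List.drop_eq_getElem_cons h, List.getD_eq_getElem?_getD,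
    List.getElem?_eq_getElem h]
  simp

-- B's window test at position k = i+1, re-read as the stencil's separator condition
theorem pvGlue_eq (tokens : List String) (i : Nat) (h1 : i + 1 < tokens.length) :
    pvGlue (tokens.map pvIsL) tokens.length (i + 1) =
      (pvIsL (tokens.getD i "") && pvIsL (tokens.getD (i + 1) "") &&
        ((decide (1 ≤ i) && (tokens.map pvIsL).getD (i - 1) false) ||
         (match tokens.drop (i + 2) with | [] => false | z :: _ => pvIsL z))) := by
  unfold pvGlue
  have e2 : i + 1 - 2 = i - 1 := by omega
  have e3 : decide (2 ≤ i + 1) = decide (1 ≤ i) := decide_eq_decide.mpr (by omega)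
  have g0 : (tokens.map pvIsL).getD (i + 1 - 1) false = pvIsL (tokens.getD i "") := by
    simpa using pv_islGetD tokens i (by omega)
  have g1 : (tokens.map pvIsL).getD (i + 1) false = pvIsL (tokens.getD (i + 1) "") := by
    exact pv_islGetD tokens (i + 1) h1
  rw [e2, e3, g0, g1]
  by_cases h2 : i + 2 < tokens.length
  · have hd : tokens.drop (i + 2) = tokens.getD (i + 2) "" :: tokens.drop (i + 3) :=
      pv_drop_cons tokens (i + 2) h2
    have g2 : (tokens.map pvIsL).getD (i + 2) false = pvIsL (tokens.getD (i + 2) "") :=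
      pv_islGetD tokens (i + 2) h2
    rw [hd, g2]
    simp [show i + 1 + 1 < tokens.length from by omega]
  · have hd : tokens.drop (i + 2) = ([] : List String) :=
      List.drop_eq_nil_of_le (by omega)
    rw [hd]
    simp [show ¬ (i + 1 + 1 < tokens.length) from by omega]

-- B's fold, rendered: the indexed pieces from position i on ARE the stencil walk of the suffix
theorem pvB_pieces_eq_pvSt (m : Nat) (tokens : List String) (i : Nat)
    (hlen : tokens.length = i + 1 + m) :
    (tokens.getD i "").toList ++
      (((PySem.List.pyRange ((i : Int) + 1) (tokens.length : Int)).map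
          (fun k => pvPiece tokens (tokens.map pvIsL) tokens.length k.toNat)).map
        String.toList).flatten
    = pvSt (decide (1 ≤ i) && (tokens.map pvIsL).getD (i - 1) false) (tokens.drop i) := by
  induction m generalizing i with
  | zero =>
    have hrange : PySem.List.pyRange ((i : Int) + 1) (tokens.length : Int) = [] := by
      simp [PySem.List.pyRange]; omega
    have hdrop : tokens.drop i = [tokens.getD i ""] := by
      rw [pv_drop_cons tokens i (by omega), List.drop_eq_nil_of_le (by omega)]
    rw [hrange, hdrop]
    simp [pvSt]
  | succ m' ih =>
    have hi1 : i + 1 < tokens.length := by omega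
    have hcast : ((i : Int) + 1) < (tokens.length : Int) := by exact_mod_cast hi1
    rw [PySem.List.pyRange_one_cons hcast]
    simp only [List.map_cons, List.flatten_cons]
    have htn : (((i : Int) + 1)).toNat = i + 1 := by omega
    rw [htn, pvPiece_toList]
    have hc2 : (i : Int) + 1 + 1 = ((i + 1 : Nat) : Int) + 1 := by push_cast; ring
    simp only [List.append_assoc]
    rw [hc2, ih (i + 1) (by omega)]
    rw [pv_drop_cons tokens i (by omega), pv_drop_cons tokens (i + 1) hi1]
    rw [show ∀ (P : Bool) (a b : String) (l : List String), pvSt P (a :: b :: l) =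
        a.toList ++
        (if pvIsL a && pvIsL b &&
            (P || (match l with | [] => false | z :: _ => pvIsL z)) then [] else [' ']) ++
        pvSt (pvIsL a) (b :: l) from fun P a b l => rfl]
    rw [← pv_drop_cons tokens (i + 1) hi1, pvGlue_eq tokens i hi1]
    have hprev : pvIsL (tokens.getD i "") =
        (decide (1 ≤ i + 1) && (tokens.map pvIsL).getD (i + 1 - 1) false) := by
      simpa using (pv_islGetD tokens i (by omega)).symm
    rw [← hprev]
    simp

-- ===== VERDICT (by name: the statement is the Claim_ definition above) =====
theorem collapse_spelled_letters_spec : Claim_equal_collapse_spelled_letters := by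
  intro text _
  unfold Spec_collapse_spelled_letters collapse_spelled_letters collapse_spelled_letters_alt
  dsimp only
  set tokens := PySem.Str.split₀ text with htok
  by_cases h : tokens = []
  · simp [h]
  · rw [if_neg h, if_neg h]
    apply String.toList_inj.mp
    rw [PySem.Str.toList_join, PySem.Str.toList_join,
      show (" " : String).toList = [' '] from by decide,
      show ("" : String).toList = [] from by decide]
    have hA : pvALoop tokens 0 [] = pvG tokens := by
      rw [pvALoop_eq tokens.length tokens 0 [] (by omega)]; simp
    rw [hA, pvG_join_eq_pvSt tokens.length tokens (le_refl _) h]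
    rw [PySem.List.foldl_append_singleton_eq_map, pv_join_nil_flatten]
    simp only [List.singleton_append, List.map_cons, List.flatten_cons]
    have hlen : 1 ≤ tokens.length := List.length_pos_iff.mpr h
    have hfin := pvB_pieces_eq_pvSt (tokens.length - 1) tokens 0 (by omega)
    norm_num at hfin
    rw [List.map_map, List.getD_eq_getElem?_getD]
    exact hfin.symm
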